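-- pv_equiv track=rewrite | github.com/StefaniaSferragatta/ADM-HW5 | modules_hw5.py | out_subgraph
-- ===== SOURCE A (Python) =====
-- def out_subgraph(all_pages,out_degree,d):
--
--     out_d={x:[] for x in all_pages}
--
--     for key,value in out_degree.items():
--
--         if key in out_d.keys():
--
--             for x in value:
--
--                 if x in out_d.keys():
--
--                    out_d[key].append(x)
--
--
--     out_d=dict(sorted(out_d.items(),key=lambda x:x[0]))
--
--     return out_d
-- ===== SOURCE B (Python) =====
-- def _member(uniq, x):
--     # binary search for x in the sorted, duplicate-free list uniq
--     lo, hi = 0, len(uniq)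
--     while lo < hi:
--         mid = (lo + hi) // 2
--         if uniq[mid] < x:
--             lo = mid + 1
--         else:
--             hi = mid
--     return lo < len(uniq) and uniq[lo] == x
--
--
-- def out_subgraph(all_pages, out_degree, d):
--     # sorted, duplicate-free page list via sort + adjacent dedup (no hash set)
--     uniq = []
--     for p in sorted(all_pages):
--         if not uniq or uniq[-1] != p:
--             uniq.append(p)
--     out = {}
--     for p in uniq:
--         out[p] = [x for x in out_degree.get(p, []) if _member(uniq, x)]
--     return out
-- ===== Notes on version B (the rewrite author's own statement) =====
-- stated objective: alternative
-- what changed: B replaces A's hash-based pipeline (pre-initialize a dict over all pages, scan out_degree filtering by dict-key membership, sort items at the end) with a sort-based one: sort the pages, dedup adjacent duplicates to get the sorted key list, then build the result directly in key order, testing neighbour membership by hand-written binary search on that sorted list instead of hashing.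
import Mathlib
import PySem

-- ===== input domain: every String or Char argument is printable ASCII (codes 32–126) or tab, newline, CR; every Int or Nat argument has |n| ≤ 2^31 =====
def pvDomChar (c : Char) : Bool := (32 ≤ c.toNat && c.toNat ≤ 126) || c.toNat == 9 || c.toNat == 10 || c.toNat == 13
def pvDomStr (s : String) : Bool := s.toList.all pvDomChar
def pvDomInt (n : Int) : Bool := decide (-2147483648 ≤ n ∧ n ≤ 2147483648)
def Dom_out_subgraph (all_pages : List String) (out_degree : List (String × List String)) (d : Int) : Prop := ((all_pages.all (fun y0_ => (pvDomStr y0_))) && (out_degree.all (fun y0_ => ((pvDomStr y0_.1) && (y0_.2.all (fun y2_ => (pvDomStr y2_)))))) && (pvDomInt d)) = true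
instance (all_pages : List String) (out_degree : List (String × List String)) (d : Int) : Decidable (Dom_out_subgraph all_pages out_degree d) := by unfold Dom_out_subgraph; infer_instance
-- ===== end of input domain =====

-- B replaces A's hash pipeline (init dict over pages / scan out_degree filtering by key membership /
-- sort at the end) by a sort-based one: sort+adjacent-dedup the pages, build the result in key order,
-- and test neighbour membership by binary search on the sorted page list; return value only, d unused as in A.

-- ===== PORT A =====
def out_subgraph (all_pages : List String) (out_degree : List (String × List String)) (d : Int) : List (String × List String) :=
  -- out_d = {x: [] for x in all_pages}
  let out_d0 : PySem.Dict String (List String) :=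
    all_pages.foldl (fun od x => od.insert x []) PySem.Dict.empty
  -- for key, value in out_degree.items(): if key in out_d: for x in value: if x in out_d: out_d[key].append(x)
  let out_d1 : PySem.Dict String (List String) :=
    (PySem.Dict.ofList out_degree).items.foldl (fun od kv =>
      if od.contains kv.1 then
        kv.2.foldl (fun od x =>
          if od.contains x then od.modify kv.1 [] (fun l => l ++ [x]) else od) od
      else od) out_d0
  -- out_d = dict(sorted(out_d.items(), key=lambda x: x[0]))
  (PySem.Dict.ofList (PySem.List.sorted out_d1.items (fun x => x.1))).items

-- ===== PORT B =====
-- _member(uniq, x): hand-written binary-search membership test (while lo < hi …)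
def pvBsLoop (uniq : List String) (x : String) (lo hi : Nat) : Nat :=
  if _h : lo < hi then
    -- mid = (lo + hi) // 2; uniq[mid]: mid < hi ≤ len(uniq) here, so the plain in-range access is exact
    if uniq.getD ((lo + hi) / 2) "" < x then pvBsLoop uniq x ((lo + hi) / 2 + 1) hi
    else pvBsLoop uniq x lo ((lo + hi) / 2)
  else lo
termination_by hi - lo
decreasing_by all_goals omega

def pvMember (uniq : List String) (x : String) : Bool :=
  let lo := pvBsLoop uniq x 0 uniq.length
  lo < uniq.length && (uniq.getD lo "" == x)

def out_subgraph_alt (all_pages : List String) (out_degree : List (String × List String)) (d : Int) : List (String × List String) :=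
  -- uniq = []; for p in sorted(all_pages): if not uniq or uniq[-1] != p: uniq.append(p)
  let uniq : List String :=
    (PySem.List.sorted all_pages (fun p => p)).foldl
      (fun u p => if u.isEmpty || !(u.getLast? == some p) then u ++ [p] else u) []
  let od : PySem.Dict String (List String) := PySem.Dict.ofList out_degree
  -- out = {}; for p in uniq: out[p] = [x for x in out_degree.get(p, []) if _member(uniq, x)]
  (uniq.foldl (fun out p =>
      out.insert p ((od.getD p []).filter (fun x => pvMember uniq x))) PySem.Dict.empty).items

-- ===== PRECONDITION & SPEC =====
def Spec_out_subgraph (all_pages : List String) (out_degree : List (String × List String)) (d : Int) (out : List (String × List String)) : Prop := out = out_subgraph_alt all_pages out_degree d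
instance (all_pages : List String) (out_degree : List (String × List String)) (d : Int) (out : List (String × List String)) : Decidable (Spec_out_subgraph all_pages out_degree d out) := by unfold Spec_out_subgraph; infer_instance

-- ===== CLAIM (what is proved, stated in full; the proofs are below) =====
def Claim_equal_out_subgraph : Prop := ∀ (all_pages : List String) (out_degree : List (String × List String)) (d : Int), Dom_out_subgraph all_pages out_degree d → Spec_out_subgraph all_pages out_degree d (out_subgraph all_pages out_degree d)

-- ===== LEMMAS AND PROOFS =====

-- the base dict {x: [] for x in all_pages} maps everything (present or not) to [] under default []
theorem pv_base_getD (l : List String) (od : PySem.Dict String (List String))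
    (h : ∀ q, od.getD q [] = []) (q : String) :
    (l.foldl (fun od x => od.insert x ([] : List String)) od).getD q [] = [] := by
  induction l generalizing od with
  | nil => exact h q
  | cons a t ih =>
      refine ih _ (fun r => ?_)
      by_cases hr : r = a
      · subst hr; exact PySem.Dict.getD_insert_self ..
      · rw [PySem.Dict.getD_insert_of_ne _ _ _ hr]; exact h r

-- inner loop of A: appending the filtered neighbours to out_d[k]; keys are unchanged
theorem pv_inner (v : List String) (od : PySem.Dict String (List String)) (k : String)
    (hk : od.contains k = true) :
    (v.foldl (fun od x =>
        if od.contains x then od.modify k [] (fun l => l ++ [x]) else od) od).keys = od.keys ∧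
    ∀ q, (v.foldl (fun od x =>
        if od.contains x then od.modify k [] (fun l => l ++ [x]) else od) od).getD q [] =
      if q = k then od.getD k [] ++ v.filter (fun x => od.contains x) else od.getD q [] := by
  induction v generalizing od with
  | nil =>
      refine ⟨rfl, fun q => ?_⟩
      by_cases hq : q = k
      · simp [hq]
      · simp [hq]
  | cons x t ih =>
      by_cases hx : od.contains x = true
      · have hkeys : (od.modify k ([] : List String) (fun l => l ++ [x])).keys = od.keys := by
          rw [PySem.Dict.keys_modify]
          exact PySem.Dict.keys_insert_of_contains _ _ hk
        have hcont : ∀ q, (od.modify k ([] : List String) (fun l => l ++ [x])).contains q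
            = od.contains q := by
          intro q
          rw [PySem.Dict.contains_modify]
          by_cases hq : q = k
          · subst hq; simp [hk]
          · simp [hq]
        have hk' : (od.modify k ([] : List String) (fun l => l ++ [x])).contains k = true := by
          rw [hcont]; exact hk
        obtain ⟨ihk, ihg⟩ := ih _ hk'
        refine ⟨?_, fun q => ?_⟩
        · simp only [List.foldl_cons, hx, if_pos]
          rw [ihk, hkeys]
        · simp only [List.foldl_cons, hx, if_pos]
          rw [ihg q]
          have hfilt : t.filter (fun y => (od.modify k ([] : List String) (fun l => l ++ [x])).contains y)
              = t.filter (fun y => od.contains y) :=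
            List.filter_congr (fun y _ => by rw [hcont])
          by_cases hq : q = k
          · subst hq
            rw [if_pos rfl, if_pos rfl, hfilt, PySem.Dict.getD_modify_self,
              List.filter_cons_of_pos hx]
            simp [List.append_assoc]
          · simp only [if_neg hq]
            rw [PySem.Dict.getD_modify_of_ne _ _ _ hq]
      · have hx' : od.contains x = false := by simpa using hx
        obtain ⟨ihk, ihg⟩ := ih _ hk
        refine ⟨?_, fun q => ?_⟩
        · simp only [List.foldl_cons, hx', if_neg Bool.false_ne_true, ihk]
        · simp only [List.foldl_cons, hx', if_neg Bool.false_ne_true]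
          rw [ihg q, List.filter_cons_of_neg (by simp [hx'])]

-- outer loop of A over the (nodup-keyed) items of out_degree
theorem pv_outer (L : List (String × List String)) (od : PySem.Dict String (List String))
    (hnd : (L.map Prod.fst).Nodup) :
    (L.foldl (fun od kv =>
        if od.contains kv.1 then
          kv.2.foldl (fun od x =>
            if od.contains x then od.modify kv.1 [] (fun l => l ++ [x]) else od) od
        else od) od).keys = od.keys ∧
    ∀ q, (L.foldl (fun od kv =>
        if od.contains kv.1 then
          kv.2.foldl (fun od x =>
            if od.contains x then od.modify kv.1 [] (fun l => l ++ [x]) else od) od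
        else od) od).getD q [] =
      od.getD q [] ++ (if od.contains q then
        (((PySem.Dict.mk L).get? q).getD []).filter (fun x => od.contains x) else []) := by
  induction L generalizing od with
  | nil =>
      refine ⟨rfl, fun q => ?_⟩
      by_cases hq : od.contains q <;> simp [hq, PySem.Dict.get?]
  | cons kv t ih =>
      obtain ⟨k, v⟩ := kv
      simp only [List.map_cons, List.nodup_cons] at hnd
      obtain ⟨hknot, hndt⟩ := hnd
      by_cases hk : od.contains k = true
      · obtain ⟨ikeys, ig⟩ := pv_inner v od k hk
        set od' := v.foldl (fun od x =>
            if od.contains x then od.modify k [] (fun l => l ++ [x]) else od) od with hod'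
        have hcont : ∀ q, od'.contains q = od.contains q := by
          intro q
          rw [PySem.Dict.contains_eq_decide_mem_keys, PySem.Dict.contains_eq_decide_mem_keys, ikeys]
        obtain ⟨ihk, ihg⟩ := ih od' hndt
        refine ⟨?_, fun q => ?_⟩
        · simp only [List.foldl_cons, hk, if_pos]
          rw [ihk, ikeys]
        · simp only [List.foldl_cons, hk, if_pos]
          rw [ihg q, ig q]
          have hfilt : ∀ (w : List String), w.filter (fun x => od'.contains x)
              = w.filter (fun x => od.contains x) :=
            fun w => List.filter_congr (fun y _ => by rw [hcont])
          rw [hcont q]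
          by_cases hq : q = k
          · subst hq
            have hget : ((PySem.Dict.mk t).get? q) = none := by
              rw [PySem.Dict.get?_eq_none_iff_not_mem_keys]
              simpa [PySem.Dict.keys, PySem.Dict.items] using hknot
            rw [PySem.Dict.get?_mk_cons]
            simp [hget, hk, hfilt]
          · rw [PySem.Dict.get?_mk_cons]
            have hbq : (k == q) = false := by simp [Ne.symm hq]
            simp only [hbq, if_neg Bool.false_ne_true, if_neg hq, hfilt]
      · have hk' : od.contains k = false := by simpa using hk
        obtain ⟨ihk, ihg⟩ := ih od hndt
        refine ⟨?_, fun q => ?_⟩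
        · simp only [List.foldl_cons, hk', if_neg Bool.false_ne_true, ihk]
        · simp only [List.foldl_cons, hk', if_neg Bool.false_ne_true]
          rw [ihg q, PySem.Dict.get?_mk_cons]
          by_cases hq : k = q
          · subst hq; simp [hk']
          · have : (k == q) = false := by simp [hq]
            simp only [this, if_neg Bool.false_ne_true]

-- dict() of a list of pairs with pairwise-distinct firsts keeps it as is
theorem pv_ofList_items (ps : List (String × List String)) (hnd : (ps.map Prod.fst).Nodup) :
    (PySem.Dict.ofList ps).items = ps := by
  have := PySem.Dict.items_foldl_insert_fresh ps Prod.fst Prod.snd PySem.Dict.empty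
    (fun a _ => PySem.Dict.contains_empty _) hnd
  simpa [PySem.Dict.ofList, PySem.Dict.update, PySem.Dict.empty, PySem.Dict.items] using this

-- A in canonical form: sorted distinct pages, each with its membership-filtered neighbour list
theorem pv_A_canon (all_pages : List String) (out_degree : List (String × List String)) (d : Int) :
    out_subgraph all_pages out_degree d =
      (PySem.List.sorted (PySem.Set.ofList all_pages) (fun p => p)).map
        (fun p => (p, ((PySem.Dict.ofList out_degree).getD p []).filter
          (fun x => PySem.Set.contains (PySem.Set.ofList all_pages) x))) := by
  unfold out_subgraph
  dsimp only
  set S : List String := PySem.Set.ofList all_pages with hS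
  set OD : PySem.Dict String (List String) := PySem.Dict.ofList out_degree with hOD
  set base : PySem.Dict String (List String) :=
    all_pages.foldl (fun od x => od.insert x []) PySem.Dict.empty with hbase
  have hbkeys : base.keys = S := by
    rw [hbase, PySem.Dict.keys_foldl_insert all_pages (fun _ _ => ([] : List String))]
    simp [PySem.Dict.keys_empty, PySem.Set.update_eq_foldl, PySem.Set.ofList_eq_foldl, hS]
  have hbget : ∀ q, base.getD q [] = [] :=
    pv_base_getD all_pages PySem.Dict.empty (fun q => PySem.Dict.getD_empty ..)
  have hbcont : ∀ q, base.contains q = decide (q ∈ S) := by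
    intro q; rw [PySem.Dict.contains_eq_decide_mem_keys, hbkeys]
  have hODnd : (OD.items.map Prod.fst).Nodup := PySem.Dict.nodup_keys_ofList out_degree
  obtain ⟨okeys, og⟩ := pv_outer OD.items base hODnd
  set od1 : PySem.Dict String (List String) :=
    OD.items.foldl (fun od kv =>
      if od.contains kv.1 then
        kv.2.foldl (fun od x =>
          if od.contains x then od.modify kv.1 [] (fun l => l ++ [x]) else od) od
      else od) base with hod1
  have hkeys1 : od1.keys = S := by rw [okeys, hbkeys]
  have hval : ∀ q ∈ S, od1.getD q [] =
      (OD.getD q []).filter (fun x => PySem.Set.contains S x) := by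
    intro q hq
    rw [og q, hbget q, hbcont q]
    simp only [hq, decide_true, if_pos]
    rw [List.nil_append, PySem.Dict.getD_eq_get?_getD]
    have hmk : (PySem.Dict.mk OD.items) = OD := rfl
    rw [hmk]
    exact List.filter_congr (fun y _ => by
      rw [hbcont y, PySem.Set.contains_eq_decide])
  have hitems : od1.items = S.map (fun k => (k, od1.getD k [])) := by
    rw [← hkeys1]
    exact PySem.Dict.items_eq_map_keys od1 (hkeys1 ▸ PySem.Set.nodup_ofList all_pages) []
  have hsorted : PySem.List.sorted od1.items (fun x => x.1)
      = (PySem.List.sorted S (fun p => p)).map (fun k => (k, od1.getD k [])) := by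
    apply PySem.List.sorted_eq_of_perm_of_pairwise_lt
    · rw [hitems]
      exact (List.Perm.map _ (PySem.List.sorted_perm S (fun p => p) false))
    · rw [List.pairwise_map]
      exact PySem.List.sorted_ofList_pairwise_lt all_pages
  rw [hsorted]
  have hsnd : ((PySem.List.sorted S (fun p => p)).map (fun k => (k, od1.getD k []))).map Prod.fst
      = PySem.List.sorted S (fun p => p) := by
    rw [List.map_map]
    exact (List.map_congr_left fun a _ => rfl).trans (List.map_id _)
  rw [pv_ofList_items _ (by rw [hsnd]; exact ((PySem.List.sorted_perm S (fun p => p) false).symm.nodup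
    (PySem.Set.nodup_ofList all_pages)))]
  refine List.map_congr_left (fun p hp => ?_)
  have hpS : p ∈ S := (PySem.List.mem_sorted S (fun p => p) false p).mp hp
  rw [hval p hpS]

-- every member of a strictly increasing list is ≤ its last element
theorem pv_le_getLast (l : List String) (hl : l.Pairwise (· < ·)) (a : String) (ha : a ∈ l)
    (m : String) (hm : l.getLast? = some m) : a ≤ m := by
  obtain ⟨i, hi, rfl⟩ := List.mem_iff_getElem.mp ha
  have hlen : 0 < l.length := by omega
  have hml : m = l[l.length - 1] := by
    rw [List.getLast?_eq_getElem?, List.getElem?_eq_getElem (by omega)] at hm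
    exact (Option.some.inj hm).symm
  subst hml
  rcases Nat.lt_or_ge i (l.length - 1) with h | h
  · exact le_of_lt (List.pairwise_iff_getElem.mp hl i (l.length - 1) hi (by omega) h)
  · have : i = l.length - 1 := by omega
    simp [this]

-- adjacent dedup of a ≤-sorted list: strictly increasing, same members
theorem pv_dedup (l acc : List String)
    (hacc : acc.Pairwise (· < ·))
    (hl : l.Pairwise (· ≤ ·))
    (hconn : ∀ a ∈ acc, ∀ y ∈ l, a ≤ y) :
    (l.foldl (fun u p => if u.isEmpty || !(u.getLast? == some p) then u ++ [p] else u) acc).Pairwise (· < ·) ∧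
    ∀ z, z ∈ (l.foldl (fun u p => if u.isEmpty || !(u.getLast? == some p) then u ++ [p] else u) acc) ↔
      z ∈ acc ∨ z ∈ l := by
  induction l generalizing acc with
  | nil => exact ⟨hacc, fun z => by simp⟩
  | cons p t ih =>
      rw [List.pairwise_cons] at hl
      obtain ⟨hpt, htp⟩ := hl
      by_cases hc : (acc.isEmpty || !(acc.getLast? == some p)) = true
      · -- append p
        have hlt : ∀ a ∈ acc, a < p := by
          intro a ha
          have hle : a ≤ p := hconn a ha p (List.mem_cons_self ..)
          rcases lt_or_eq_of_le hle with h | h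
          · exact h
          · subst h
            exfalso
            rcases Bool.or_eq_true_iff.mp hc with he | hne
            · rw [List.isEmpty_iff] at he; subst he; exact (List.not_mem_nil ha)
            · have hne' : acc.getLast? ≠ some a := by
                intro hEq; rw [hEq] at hne; simp at hne
              obtain ⟨m, hm⟩ := Option.ne_none_iff_exists'.mp
                (by simp [List.getLast?_eq_none_iff]; rintro rfl; exact List.not_mem_nil ha :
                  acc.getLast? ≠ none)
              have h1 : a ≤ m := pv_le_getLast acc hacc a ha m hm
              have h2 : m ≤ a := hconn m (List.mem_of_getLast? hm) a (List.mem_cons_self ..)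
              exact hne' (by rw [hm, le_antisymm h1 h2])
        have hacc' : (acc ++ [p]).Pairwise (· < ·) := by
          rw [List.pairwise_append]
          exact ⟨hacc, List.pairwise_singleton .., fun a ha b hb => by
            rw [List.mem_singleton] at hb; subst hb; exact hlt a ha⟩
        have hconn' : ∀ a ∈ acc ++ [p], ∀ y ∈ t, a ≤ y := by
          intro a ha y hy
          rcases List.mem_append.mp ha with h | h
          · exact hconn a h y (List.mem_cons_of_mem _ hy)
          · rw [List.mem_singleton] at h; subst h; exact hpt y hy
        obtain ⟨hp1, hp2⟩ := ih (acc ++ [p]) hacc' htp hconn'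
        refine ⟨by simp only [List.foldl_cons, hc, if_true]; exact hp1, fun z => ?_⟩
        simp only [List.foldl_cons, hc, if_true]
        rw [hp2]
        simp only [List.mem_append, List.mem_cons]
        tauto
      · -- skip p: p is the last element of acc
        have hc' : (acc.isEmpty || !(acc.getLast? == some p)) = false := by
          simpa using hc
        have hpacc : p ∈ acc := by
          rcases Bool.or_eq_false_iff.mp hc' with ⟨_, hne⟩
          have hl' : acc.getLast? = some p := by simpa using hne
          exact List.mem_of_getLast? hl'
        obtain ⟨hp1, hp2⟩ := ih acc hacc htp (fun a ha y hy => hconn a ha y (List.mem_cons_of_mem _ hy))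
        refine ⟨by simp only [List.foldl_cons, hc', Bool.false_eq_true, if_false]; exact hp1, fun z => ?_⟩
        simp only [List.foldl_cons, hc', Bool.false_eq_true, if_false]
        rw [hp2]
        constructor
        · rintro (h | h)
          · exact Or.inl h
          · exact Or.inr (List.mem_cons_of_mem _ h)
        · rintro (h | h)
          · exact Or.inl h
          · rcases List.mem_cons.mp h with rfl | h
            · exact Or.inl hpacc
            · exact Or.inr h

-- binary-search loop invariant on a strictly increasing list (fuel-indexed induction)
theorem pv_bs_aux (u : List String) (x : String) (hu : u.Pairwise (· < ·)) :
    ∀ (n lo hi : Nat), hi - lo ≤ n → hi ≤ u.length → lo ≤ hi →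
    (∀ i (h : i < u.length), i < lo → u[i] < x) →
    (∀ i (h : i < u.length), hi ≤ i → ¬ u[i] < x) →
    (∀ i (h : i < u.length), i < pvBsLoop u x lo hi → u[i] < x) ∧
    (∀ i (h : i < u.length), pvBsLoop u x lo hi ≤ i → ¬ u[i] < x) ∧
    pvBsLoop u x lo hi ≤ u.length := by
  intro n
  induction n with
  | zero =>
      intro lo hi hfuel hhi hlo h1 h2
      have hEq : lo = hi := by omega
      subst hEq
      rw [pvBsLoop, dif_neg (by omega)]
      exact ⟨h1, h2, by omega⟩
  | succ n ih =>
      intro lo hi hfuel hhi hlo h1 h2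
      rw [pvBsLoop]
      by_cases hlh : lo < hi
      · rw [dif_pos hlh]
        have hmlt : (lo + hi) / 2 < hi := by omega
        have hmge : lo ≤ (lo + hi) / 2 := by omega
        have hmlen : (lo + hi) / 2 < u.length := by omega
        rw [List.getD_eq_getElem u "" hmlen]
        by_cases hcmp : u[(lo + hi) / 2] < x
        · rw [if_pos hcmp]
          refine ih ((lo + hi) / 2 + 1) hi (by omega) hhi (by omega) ?_ h2
          intro i h hi2
          rcases Nat.lt_or_ge i lo with h3 | h3
          · exact h1 i h h3
          · have h4 : i ≤ (lo + hi) / 2 := by omega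
            rcases Nat.lt_or_ge i ((lo + hi) / 2) with h5 | h5
            · exact lt_trans (List.pairwise_iff_getElem.mp hu i ((lo + hi) / 2) h hmlen h5) hcmp
            · have : i = (lo + hi) / 2 := by omega
              subst this; exact hcmp
        · rw [if_neg hcmp]
          refine ih lo ((lo + hi) / 2) (by omega) (by omega) hmge h1 ?_
          intro i h hi2 hix
          rcases Nat.lt_or_ge ((lo + hi) / 2) i with h5 | h5
          · exact hcmp (lt_trans (List.pairwise_iff_getElem.mp hu ((lo + hi) / 2) i hmlen h h5) hix)
          · have : i = (lo + hi) / 2 := by omega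
            subst this; exact hcmp hix
      · rw [dif_neg hlh]
        have hEq : lo = hi := by omega
        exact ⟨h1, fun i h hge => h2 i h (by omega), by omega⟩

-- membership by binary search = list membership, on a strictly increasing list
theorem pv_member_iff (u : List String) (hu : u.Pairwise (· < ·)) (x : String) :
    pvMember u x = decide (x ∈ u) := by
  obtain ⟨hA, hB, hC⟩ := pv_bs_aux u x hu (u.length) 0 u.length (by omega) le_rfl (Nat.zero_le _)
    (fun i h hlt => absurd hlt (by omega)) (fun i h hge => absurd h (by omega))
  unfold pvMember
  apply Bool.coe_iff_coe.mp
  simp only [Bool.and_eq_true, decide_eq_true_eq, beq_iff_eq]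
  constructor
  · rintro ⟨hr, he⟩
    rw [List.getD_eq_getElem u "" hr] at he
    exact he ▸ List.getElem_mem hr
  · intro hx
    obtain ⟨j, hj, hxe⟩ := List.mem_iff_getElem.mp hx
    have hrj : pvBsLoop u x 0 u.length ≤ j := by
      by_contra h
      exact lt_irrefl _ (hxe ▸ hA j hj (by omega))
    have hrlen : pvBsLoop u x 0 u.length < u.length := by omega
    have hnr : ¬ u[pvBsLoop u x 0 u.length] < x := hB _ hrlen le_rfl
    have hreq : pvBsLoop u x 0 u.length = j := by
      rcases Nat.lt_or_ge (pvBsLoop u x 0 u.length) j with h5 | h5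
      · exact absurd (hxe ▸ List.pairwise_iff_getElem.mp hu _ j hrlen hj h5) hnr
      · omega
    refine ⟨hrlen, ?_⟩
    rw [List.getD_eq_getElem u "" hrlen]
    subst hreq
    exact hxe

-- B in the same canonical form
theorem pv_B_canon (all_pages : List String) (out_degree : List (String × List String)) (d : Int) :
    out_subgraph_alt all_pages out_degree d =
      (PySem.List.sorted (PySem.Set.ofList all_pages) (fun p => p)).map
        (fun p => (p, ((PySem.Dict.ofList out_degree).getD p []).filter
          (fun x => PySem.Set.contains (PySem.Set.ofList all_pages) x))) := by
  unfold out_subgraph_alt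
  dsimp only
  set S : List String := PySem.Set.ofList all_pages with hS
  set L : List String := PySem.List.sorted S (fun p => p) with hL
  set sp : List String := PySem.List.sorted all_pages (fun p => p) with hsp
  set uniq : List String :=
    sp.foldl (fun u p => if u.isEmpty || !(u.getLast? == some p) then u ++ [p] else u) [] with huq
  have hspP : sp.Pairwise (· ≤ ·) := PySem.List.sorted_pairwise all_pages (fun p => p)
  obtain ⟨hP, hM⟩ := pv_dedup sp [] List.Pairwise.nil hspP (by simp)
  have hLP : L.Pairwise (· < ·) := PySem.List.sorted_ofList_pairwise_lt all_pages
  have hmem : ∀ z, z ∈ uniq ↔ z ∈ S := by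
    intro z
    rw [huq, hM z]
    simp only [List.not_mem_nil, false_or]
    rw [hsp, PySem.List.mem_sorted, hS, PySem.Set.mem_ofList]
  have huL : uniq = L := by
    refine List.Perm.eq_of_pairwise (le := (· < ·))
      (fun a b _ _ hab hba => absurd hba (lt_asymm hab)) hP hLP ?_
    refine (List.perm_ext_iff_of_nodup (hP.imp fun h => ne_of_lt h)
      (hLP.imp fun h => ne_of_lt h)).mpr ?_
    intro a
    rw [hmem a, hL, PySem.List.mem_sorted]
  have hitems := PySem.Dict.items_foldl_insert_fresh uniq (fun p => p)
    (fun p => ((PySem.Dict.ofList out_degree).getD p []).filter (fun x => pvMember uniq x))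
    PySem.Dict.empty (fun a _ => PySem.Dict.contains_empty _)
    (by rw [List.map_id']; exact hP.imp fun h => ne_of_lt h)
  rw [hitems]
  simp only [PySem.Dict.empty, List.nil_append]
  rw [huL]
  refine List.map_congr_left (fun p _ => ?_)
  congr 1
  refine List.filter_congr (fun y _ => ?_)
  rw [← huL, pv_member_iff uniq (huL ▸ hLP) y, PySem.Set.contains_eq_decide]
  congr 1
  rw [eq_iff_iff, hmem y, hS]

-- ===== VERDICT (by name: the statement is the Claim_ definition above) =====
theorem out_subgraph_spec : Claim_equal_out_subgraph := by
  intro all_pages out_degree d _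
  unfold Spec_out_subgraph
  rw [pv_A_canon, pv_B_canon]
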